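-- pv_equiv track=rewrite | github.com/rehandalal/aoc2020 | day12/__init__.py | solve
-- ===== SOURCE A (Python) =====
-- DIRECTIONS = ["E", "S", "W", "N"]
--
-- def solve(data):
--     dir = 0
--     x = 0
--     y = 0
--
--     for inst, val in data:
--         if inst == "F":
--             inst = DIRECTIONS[dir]
--         elif inst == "R":
--             dir = (dir + (val // 90)) % 4
--         elif inst == "L":
--             dir = (dir - (val // 90)) % 4
--
--         if inst == "E":
--             x += val
--         elif inst == "W":
--             x -= val
--         elif inst == "N":
--             y += val
--         elif inst == "S":
--             y -= val
--
--     return abs(x) + abs(y)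
-- ===== SOURCE B (Python) =====
-- def _heading_vec(t):
--     # unit vector after t clockwise quarter-turns from East, by closed formula
--     h = t % 4
--     return (1 - h, 0) if h % 2 == 0 else (0, h - 2)
--
-- def _step_vec(inst, t):
--     if inst == "F":
--         return _heading_vec(t)
--     if inst == "E":
--         return (1, 0)
--     if inst == "W":
--         return (-1, 0)
--     if inst == "N":
--         return (0, 1)
--     if inst == "S":
--         return (0, -1)
--     return (0, 0)
--
-- def solve(data):
--     # Stage 1: annotate every instruction with the cumulative quarter-turn
--     # count accumulated before it (turns are a prefix sum, independent of moves).
--     annotated = []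
--     t = 0
--     for inst, val in data:
--         annotated.append((inst, val, t))
--         if inst == "R":
--             t += val // 90
--         elif inst == "L":
--             t -= val // 90
--     # Stage 2: sum the displacement vectors.
--     x = sum(_step_vec(inst, t0)[0] * val for inst, val, t0 in annotated)
--     y = sum(_step_vec(inst, t0)[1] * val for inst, val, t0 in annotated)
--     return abs(x) + abs(y)
-- ===== Notes on version B (the rewrite author's own statement) =====
-- stated objective: alternative
-- what changed: Replaces A's single-pass simulation of a mutable direction index with two staged passes: a prefix-sum pass annotating each instruction with the cumulative quarter-turn count, then a summation of displacement vectors computed from that count by a closed arithmetic formula (no direction table, no mutable heading during movement).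
import Mathlib
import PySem

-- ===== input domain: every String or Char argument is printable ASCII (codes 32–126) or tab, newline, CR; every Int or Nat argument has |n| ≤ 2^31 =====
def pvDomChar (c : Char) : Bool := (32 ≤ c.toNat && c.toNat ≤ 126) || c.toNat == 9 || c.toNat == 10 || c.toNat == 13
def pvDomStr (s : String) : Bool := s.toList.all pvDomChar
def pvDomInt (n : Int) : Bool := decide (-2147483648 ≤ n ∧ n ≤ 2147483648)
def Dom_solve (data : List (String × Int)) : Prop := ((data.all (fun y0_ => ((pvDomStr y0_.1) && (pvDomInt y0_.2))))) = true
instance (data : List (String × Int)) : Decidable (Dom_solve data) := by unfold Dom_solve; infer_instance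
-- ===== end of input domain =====

-- B replaces A's single-pass simulation of a mutable heading index by two staged
-- passes: a quarter-turn prefix-sum annotation pass, then a displacement-vector
-- summation with a closed arithmetic heading formula; same O(n) cost.

-- ===== PORT A =====
def DIRECTIONS : List String := ["E", "S", "W", "N"]

def solveStep (st : Int × Int × Int) (p : String × Int) : Int × Int × Int :=
  let dir := st.1; let x := st.2.1; let y := st.2.2
  let val := p.2
  -- first if-chain: may replace inst (on "F"; dir is always 0..3, the getD default is unreachable) or turn
  let di : Int × String :=
    if p.1 == "F" then (dir, (PySem.List.pyGet? DIRECTIONS dir).getD "")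
    else if p.1 == "R" then (PySem.Int.mod (dir + PySem.Int.floordiv val 90) 4, p.1)
    else if p.1 == "L" then (PySem.Int.mod (dir - PySem.Int.floordiv val 90) 4, p.1)
    else (dir, p.1)
  -- second if-chain: move
  let xy : Int × Int :=
    if di.2 == "E" then (x + val, y)
    else if di.2 == "W" then (x - val, y)
    else if di.2 == "N" then (x, y + val)
    else if di.2 == "S" then (x, y - val)
    else (x, y)
  (di.1, xy.1, xy.2)

def solve (data : List (String × Int)) : Int :=
  let st := data.foldl solveStep (0, 0, 0)
  |st.2.1| + |st.2.2|

-- ===== PORT B =====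
def headingVec (t : Int) : Int × Int :=
  let h := PySem.Int.mod t 4
  if PySem.Int.mod h 2 == 0 then (1 - h, 0) else (0, h - 2)

def stepVec (inst : String) (t : Int) : Int × Int :=
  if inst == "F" then headingVec t
  else if inst == "E" then (1, 0)
  else if inst == "W" then (-1, 0)
  else if inst == "N" then (0, 1)
  else if inst == "S" then (0, -1)
  else (0, 0)

-- stage-1 loop body: append the annotated instruction, update the turn prefix sum
def annotStep (st : List (String × Int × Int) × Int) (p : String × Int) :
    List (String × Int × Int) × Int :=
  let acc := st.1 ++ [(p.1, p.2, st.2)]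
  if p.1 == "R" then (acc, st.2 + PySem.Int.floordiv p.2 90)
  else if p.1 == "L" then (acc, st.2 - PySem.Int.floordiv p.2 90)
  else (acc, st.2)

def solve_alt (data : List (String × Int)) : Int :=
  let ann := (data.foldl annotStep ([], 0)).1
  let x := (ann.map (fun q => (stepVec q.1 q.2.2).1 * q.2.1)).sum
  let y := (ann.map (fun q => (stepVec q.1 q.2.2).2 * q.2.1)).sum
  |x| + |y|

-- ===== PRECONDITION & SPEC =====
def Spec_solve (data : List (String × Int)) (out : Int) : Prop := out = solve_alt data
instance (data : List (String × Int)) (out : Int) : Decidable (Spec_solve data out) := by unfold Spec_solve; infer_instance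

-- ===== CLAIM (what is proved, stated in full; the proofs are below) =====
def Claim_equal_solve : Prop := ∀ (data : List (String × Int)), Dom_solve data → Spec_solve data (solve data)

-- ===== LEMMAS AND PROOFS =====

-- recursive characterisation of stage 1's annotated list
def annRec : List (String × Int) → Int → List (String × Int × Int)
  | [], _ => []
  | (i, v) :: rest, t =>
      (i, v, t) :: annRec rest
        (if i == "R" then t + PySem.Int.floordiv v 90
         else if i == "L" then t - PySem.Int.floordiv v 90 else t)

lemma annot_foldl : ∀ (data : List (String × Int)) (acc : List (String × Int × Int)) (t : Int),
    (data.foldl annotStep (acc, t)).1 = acc ++ annRec data t := by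
  intro data
  induction data with
  | nil => intro acc t; simp [annRec]
  | cons p rest ih =>
    intro acc t
    obtain ⟨i, v⟩ := p
    simp only [List.foldl_cons, annotStep, annRec]
    split_ifs <;> rw [ih] <;> simp

lemma main_sim : ∀ (data : List (String × Int)) (t x y : Int),
    (data.foldl solveStep (PySem.Int.mod t 4, x, y)).2
      = (x + ((annRec data t).map (fun q => (stepVec q.1 q.2.2).1 * q.2.1)).sum,
         y + ((annRec data t).map (fun q => (stepVec q.1 q.2.2).2 * q.2.1)).sum) := by
  intro data
  induction data with
  | nil => intro t x y; simp [annRec]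
  | cons p rest ih =>
    intro t x y
    obtain ⟨i, v⟩ := p
    simp only [List.foldl_cons, annRec, List.map_cons, List.sum_cons]
    by_cases hF : i = "F"
    · subst hF
      have hmod : PySem.Int.mod t 4 = t % 4 := PySem.Int.mod_eq_emod_of_pos (by norm_num)
      have hb : t % 4 = 0 ∨ t % 4 = 1 ∨ t % 4 = 2 ∨ t % 4 = 3 := by omega
      have hstep : solveStep (PySem.Int.mod t 4, x, y) ("F", v)
          = (PySem.Int.mod t 4, x + (stepVec "F" t).1 * v, y + (stepVec "F" t).2 * v) := by
        simp only [stepVec, headingVec, hmod]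
        rcases hb with h | h | h | h <;>
          simp [solveStep, DIRECTIONS, PySem.List.pyGet?, PySem.List.pyIdx?, h] <;> ring
      rw [hstep, ih t]
      simp only [show (("F":String) == "R") = false from by decide,
        show (("F":String) == "L") = false from by decide, Bool.false_eq_true,
        if_false, Prod.mk.injEq]
      constructor <;> ring
    · by_cases hR : i = "R"
      · subst hR
        have hstep : solveStep (PySem.Int.mod t 4, x, y) ("R", v)
            = (PySem.Int.mod (PySem.Int.mod t 4 + PySem.Int.floordiv v 90) 4, x, y) := by
          simp [solveStep]
        have hmm : PySem.Int.mod (PySem.Int.mod t 4 + PySem.Int.floordiv v 90) 4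
            = PySem.Int.mod (t + PySem.Int.floordiv v 90) 4 := by
          simp only [PySem.Int.mod_eq_emod_of_pos (show (0:Int) < 4 by norm_num)]
          omega
        rw [hstep, hmm, ih (t + PySem.Int.floordiv v 90)]
        simp [stepVec]
      · by_cases hL : i = "L"
        · subst hL
          have hstep : solveStep (PySem.Int.mod t 4, x, y) ("L", v)
              = (PySem.Int.mod (PySem.Int.mod t 4 - PySem.Int.floordiv v 90) 4, x, y) := by
            simp [solveStep]
          have hmm : PySem.Int.mod (PySem.Int.mod t 4 - PySem.Int.floordiv v 90) 4
              = PySem.Int.mod (t - PySem.Int.floordiv v 90) 4 := by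
            simp only [PySem.Int.mod_eq_emod_of_pos (show (0:Int) < 4 by norm_num)]
            omega
          rw [hstep, hmm, ih (t - PySem.Int.floordiv v 90)]
          simp [stepVec]
        · -- no heading change: plain move or no-op
          have hstep : solveStep (PySem.Int.mod t 4, x, y) (i, v)
              = (PySem.Int.mod t 4, x + (stepVec i t).1 * v, y + (stepVec i t).2 * v) := by
            have hbF : (i == "F") = false := by simp [hF]
            have hbR : (i == "R") = false := by simp [hR]
            have hbL : (i == "L") = false := by simp [hL]
            by_cases hE : i = "E"
            · subst hE; simp [solveStep, stepVec]
            · by_cases hW : i = "W"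
              · subst hW; simp [solveStep, stepVec]; ring_nf
              · by_cases hN : i = "N"
                · subst hN; simp [solveStep, stepVec]
                · by_cases hS : i = "S"
                  · subst hS; simp [solveStep, stepVec]; ring_nf
                  · have hbE : (i == "E") = false := by simp [hE]
                    have hbW : (i == "W") = false := by simp [hW]
                    have hbN : (i == "N") = false := by simp [hN]
                    have hbS : (i == "S") = false := by simp [hS]
                    simp [solveStep, stepVec, hbF, hbR, hbL, hbE, hbW, hbN, hbS]
          rw [hstep, ih t]
          have hann : (if i == "R" then t + PySem.Int.floordiv v 90
              else if i == "L" then t - PySem.Int.floordiv v 90 else t) = t := by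
            simp [hR, hL]
          rw [hann]
          ring_nf

-- ===== VERDICT (by name: the statement is the Claim_ definition above) =====
theorem solve_spec : Claim_equal_solve := by
  intro data _
  unfold Spec_solve
  simp only [solve, solve_alt]
  rw [annot_foldl data [] 0, List.nil_append]
  have h := main_sim data 0 0 0
  rw [show PySem.Int.mod 0 4 = 0 from by decide] at h
  have hx := congrArg Prod.fst h
  have hy := congrArg Prod.snd h
  rw [hx, hy]
  simp
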